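-- pv_equiv track=rewrite | github.com/alcoccoque/Homeworks | hw4/ylwrbxsn-python_online_task_4_exercise_1/task_4_ex_1.py | swap_quotes
-- ===== SOURCE A (Python) =====
-- def swap_quotes(string: str) -> str:
--         somestr = []
--         for i in string:
--             if i == '"':
--                 somestr.append("'")
--             elif i == "'":
--                 somestr.append('"')
--             else:
--                 somestr.append(i)
--         return ''.join(somestr)
-- ===== SOURCE B (Python) =====
-- def swap_quotes(string: str) -> str:
--     # Divide and conquer: split in half, swap each half recursively, concatenate.
--     if len(string) == 0:
--         return ""
--     if len(string) == 1:
--         return {'"': "'", "'": '"'}.get(string, string)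
--     mid = len(string) // 2
--     return swap_quotes(string[:mid]) + swap_quotes(string[mid:])
-- ===== Notes on version B (the rewrite author's own statement) =====
-- stated objective: alternative
-- what changed: Replaced the left-to-right loop with an accumulator list and join by a divide-and-conquer recursion: the string is split in half, each half is swapped recursively, and the results are concatenated, with a dict lookup at the single-character base case.
import Mathlib
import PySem

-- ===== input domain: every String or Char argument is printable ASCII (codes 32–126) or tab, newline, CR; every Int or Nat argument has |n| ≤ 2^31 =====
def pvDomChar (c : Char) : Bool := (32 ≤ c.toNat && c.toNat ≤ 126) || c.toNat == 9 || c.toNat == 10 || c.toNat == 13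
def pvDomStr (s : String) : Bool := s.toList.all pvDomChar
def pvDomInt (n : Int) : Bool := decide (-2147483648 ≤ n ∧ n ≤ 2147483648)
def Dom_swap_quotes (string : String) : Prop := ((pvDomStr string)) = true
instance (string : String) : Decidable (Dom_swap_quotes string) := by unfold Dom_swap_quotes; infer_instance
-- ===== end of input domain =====

-- B swaps quotes by divide-and-conquer (halve, recurse, concatenate) with a dict lookup at the
-- single-character base case, instead of A's left-to-right loop with an accumulator; return value only.
-- ===== PORT A =====
def swap_quotes (string : String) : String :=
  let somestr := string.toList.foldl (fun acc i =>
    if i = '"' then acc ++ ["'"]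
    else if i = '\'' then acc ++ ["\""]
    else acc ++ [String.ofList [i]]) []
  PySem.Str.join "" somestr

-- ===== PORT B =====
-- the base-case dict of Source B: {'"': "'", "'": '"'}
def pvBaseTable : PySem.Dict String String := PySem.Dict.mk [("\"", "'"), ("'", "\"")]

-- recursion of Source B on the code points of the string
def pvAltGo (cs : List Char) : String :=
  if cs.length = 0 then ""
  else if cs.length = 1 then
    (PySem.Dict.get? pvBaseTable (String.ofList cs)).getD (String.ofList cs)
  else
    let mid := cs.length / 2
    pvAltGo (PySem.Chars.slice cs none (some (mid : Int)))
      ++ pvAltGo (PySem.Chars.slice cs (some (mid : Int)) none)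
termination_by cs.length
decreasing_by
  · rw [PySem.Chars.slice_eq_listSlice, PySem.List.slice_to_natCast]
    simp; omega
  · rw [PySem.Chars.slice_eq_listSlice, PySem.List.slice_from_natCast]
    simp; omega

def swap_quotes_alt (string : String) : String := pvAltGo string.toList

-- ===== PRECONDITION & SPEC =====
def Spec_swap_quotes (string : String) (out : String) : Prop := out = swap_quotes_alt string
instance (string : String) (out : String) : Decidable (Spec_swap_quotes string out) := by unfold Spec_swap_quotes; infer_instance

-- ===== CLAIM =====
def Claim_equal_swap_quotes : Prop := ∀ (string : String), Dom_swap_quotes string → Spec_swap_quotes string (swap_quotes string)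

-- ===== LEMMAS AND PROOFS =====
def pvG (c : Char) : Char := if c = '"' then '\'' else if c = '\'' then '"' else c

theorem pv_step_eq (acc : List String) (c : Char) :
    (if c = '"' then acc ++ ["'"]
     else if c = '\'' then acc ++ ["\""]
     else acc ++ [String.ofList [c]]) = acc ++ [String.ofList [pvG c]] := by
  by_cases h1 : c = '"'
  · subst h1; rw [if_pos rfl]; rfl
  · by_cases h2 : c = '\''
    · subst h2; rw [if_neg h1, if_pos rfl]; rfl
    · rw [if_neg h1, if_neg h2]; simp [pvG, h1, h2]

theorem pv_foldl_app (l : List Char) (acc : List String) :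
    (l.foldl (fun acc i =>
      if i = '"' then acc ++ ["'"]
      else if i = '\'' then acc ++ ["\""]
      else acc ++ [String.ofList [i]]) acc)
    = acc ++ l.map (fun c => String.ofList [pvG c]) := by
  induction l generalizing acc with
  | nil => simp
  | cons c l ih =>
    rw [List.foldl_cons, pv_step_eq acc c, ih]
    simp

theorem pv_join_singletons (cs : List Char) :
    PySem.Str.join "" (cs.map (fun c => String.ofList [c])) = String.ofList cs := by
  apply String.toList_injective
  simp [PySem.Str.toList_join, Function.comp_def]

theorem pvAltGo_eq (cs : List Char) : pvAltGo cs = String.ofList (cs.map pvG) := by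
  induction cs using pvAltGo.induct with
  | case1 cs h0 =>
    have : cs = [] := List.length_eq_zero_iff.mp h0
    subst this; simp [pvAltGo]
  | case2 cs h0 h1 =>
    obtain ⟨c, hc⟩ := List.length_eq_one_iff.mp h1
    subst hc
    rw [pvAltGo]
    rw [if_neg h0, if_pos h1]
    by_cases hq : c = '"'
    · subst hq; decide
    · by_cases hq2 : c = '\''
      · subst hq2; decide
      · have : PySem.Dict.get? pvBaseTable (String.ofList [c]) = none := by
          simp [pvBaseTable, PySem.Dict.get?]
          refine ⟨fun h => hq ?_, fun h => hq2 ?_⟩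
          · simpa using (congrArg String.toList h).symm
          · simpa using (congrArg String.toList h).symm
        simp [this, pvG, hq, hq2]
  | case3 cs h0 h1 mid ih1 ih2 =>
    rw [pvAltGo]
    simp only [if_neg h0, if_neg h1]
    rw [ih1, ih2]
    rw [PySem.Chars.slice_eq_listSlice, PySem.Chars.slice_eq_listSlice,
      PySem.List.slice_to_natCast, PySem.List.slice_from_natCast]
    apply String.toList_injective
    simp [List.map_take, List.map_drop]

-- ===== VERDICT =====
theorem swap_quotes_spec : Claim_equal_swap_quotes := by
  intro s _
  unfold Spec_swap_quotes swap_quotes swap_quotes_alt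
  rw [pv_foldl_app, pvAltGo_eq]
  simpa using pv_join_singletons (s.toList.map pvG)
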